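-- pv_equiv track=rewrite | github.com/burning-calamity/extirpation | online/running_key.py | running_key_decrypt
-- ===== SOURCE A (Python) =====
-- def _clean_key(key_text: str) -> str:
--     k = ''.join(ch for ch in key_text.upper() if ch.isalpha())
--     if not k:
--         raise ValueError('key_text must contain alphabetic characters')
--     return k
--
-- def running_key_decrypt(ciphertext: str, key_text: str) -> str:
--     key = _clean_key(key_text)
--     out = []
--     i = 0
--     for ch in ciphertext:
--         if ch.isalpha():
--             if i >= len(key):
--                 raise ValueError('key_text must be at least as long as alphabetic ciphertext')
--             base = ord('A') if ch.isupper() else ord('a')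
--             c = ord(ch.upper()) - ord('A')
--             k = ord(key[i]) - ord('A')
--             out.append(chr(base + ((c - k) % 26)))
--             i += 1
--         else:
--             out.append(ch)
--     return ''.join(out)
-- ===== SOURCE B (Python) =====
-- def _clean_key(key_text: str) -> str:
--     k = ''.join(ch for ch in key_text.upper() if ch.isalpha())
--     if not k:
--         raise ValueError('key_text must contain alphabetic characters')
--     return k
--
-- _UPPER = 'ABCDEFGHIJKLMNOPQRSTUVWXYZ'
-- _LOWER = 'abcdefghijklmnopqrstuvwxyz'
--
-- def running_key_decrypt(ciphertext: str, key_text: str) -> str: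
--     key = _clean_key(key_text)
--     positions = [i for i, ch in enumerate(ciphertext) if ch.isalpha()]
--     if len(positions) > len(key):
--         raise ValueError('key_text must be at least as long as alphabetic ciphertext')
--     buf = list(ciphertext)
--     for i, kc in zip(positions, key):
--         r = (26 - (ord(kc) - ord('A'))) % 26
--         ch = buf[i]
--         if ch.isupper():
--             buf[i] = (_UPPER[r:] + _UPPER[:r])[ord(ch) - ord('A')]
--         else:
--             buf[i] = (_LOWER[r:] + _LOWER[:r])[ord(ch) - ord('a')]
--     return ''.join(buf)
-- ===== Notes on version B (the rewrite author's own statement) =====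
-- stated objective: alternative
-- what changed: A builds the output left-to-right in one pass with a running key index and per-character modular ord-arithmetic; B instead collects the indices of alphabetic characters, checks the key length upfront, then scatter-overwrites a mutable character buffer at those indices driven by a loop over (position, key letter) pairs, decrypting by indexing into a rotated alphabet string rather than by chr/ord subtraction.
import Mathlib
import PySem

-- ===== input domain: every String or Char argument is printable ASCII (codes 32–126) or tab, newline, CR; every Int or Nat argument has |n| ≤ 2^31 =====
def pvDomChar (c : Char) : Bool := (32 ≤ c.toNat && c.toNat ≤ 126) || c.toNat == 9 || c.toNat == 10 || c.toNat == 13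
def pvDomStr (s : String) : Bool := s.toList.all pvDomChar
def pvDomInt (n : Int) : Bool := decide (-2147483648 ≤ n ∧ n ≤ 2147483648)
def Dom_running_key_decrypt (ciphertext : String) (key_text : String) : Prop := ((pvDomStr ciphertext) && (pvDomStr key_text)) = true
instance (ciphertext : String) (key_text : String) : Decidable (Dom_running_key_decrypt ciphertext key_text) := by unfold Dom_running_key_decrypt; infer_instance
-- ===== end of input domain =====

-- B replaces A's single left-to-right loop (running key index, chr/ord modular arithmetic)
-- by collecting the alphabetic positions, then scatter-overwriting a character buffer at those
-- positions, decrypting via indexing into a rotated alphabet ("alternative": same cost).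

-- ===== PORT A =====
-- _clean_key: uppercase, keep alphabetic characters (the empty-result raise is excluded by Pre_)
def rkCleanKey (key_text : String) : List Char :=
  (PySem.Chars.upper key_text.toList).filter PySem.Chars.isalpha

-- A's loop: one pass over the ciphertext, decrypting inline with running key index i
-- (the i ≥ len(key) raise is excluded by Pre_; the port returns the suffix [] there)
def rkGoA (key : List Char) : List Char → Nat → List Char
  | [], _ => []
  | ch :: rest, i =>
    if PySem.Chars.isalpha ch then
      if h : i < key.length then
        let base : Int := if PySem.Chars.isupper ch then 65 else 97
        let c : Int := ((PySem.Chars.upperChar ch).toNat : Int) - 65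
        let k : Int := ((key[i]).toNat : Int) - 65
        Char.ofNat (base + PySem.Int.mod (c - k) 26).toNat :: rkGoA key rest (i + 1)
      else []
    else ch :: rkGoA key rest i

def running_key_decrypt (ciphertext : String) (key_text : String) : String :=
  String.mk (rkGoA (rkCleanKey key_text) ciphertext.toList 0)

-- ===== PORT B =====
def rkUpper : List Char := "ABCDEFGHIJKLMNOPQRSTUVWXYZ".toList
def rkLower : List Char := "abcdefghijklmnopqrstuvwxyz".toList

-- the loop body of Source B: rotate the alphabet by the key letter, replace buf[i] by table lookup
-- (buf[i] and the table indexing are always in range when reached; getD is only a totality guard)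
def rkDecB (ch kc : Char) : Char :=
  let r : Nat := (26 - (kc.toNat - 65)) % 26
  if PySem.Chars.isupper ch then (rkUpper.drop r ++ rkUpper.take r).getD (ch.toNat - 65) ' '
  else (rkLower.drop r ++ rkLower.take r).getD (ch.toNat - 97) ' '

def rkStep (b : List Char) (p : Int × Char) : List Char :=
  b.set p.1.toNat (rkDecB (PySem.List.pyGetD b p.1 ' ') p.2)

def running_key_decrypt_alt (ciphertext : String) (key_text : String) : String :=
  let key := rkCleanKey key_text
  let cs := ciphertext.toList
  let positions := ((PySem.List.enumerate cs 0).filter (fun p => PySem.Chars.isalpha p.2)).map (fun p => p.1)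
  String.mk ((positions.zip key).foldl rkStep cs)

-- ===== PRECONDITION & SPEC =====
-- Pre_ excludes exactly the inputs on which A raises ValueError: a key with no alphabetic
-- character, or more alphabetic ciphertext characters than key letters.
def Pre_running_key_decrypt (ciphertext : String) (key_text : String) : Prop :=
  ((PySem.Chars.upper key_text.toList).filter PySem.Chars.isalpha) ≠ [] ∧
  (ciphertext.toList.filter PySem.Chars.isalpha).length ≤
    ((PySem.Chars.upper key_text.toList).filter PySem.Chars.isalpha).length

instance (ciphertext : String) (key_text : String) : Decidable (Pre_running_key_decrypt ciphertext key_text) := by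
  unfold Pre_running_key_decrypt; infer_instance

def pvWitness_running_key_decrypt : String × String := ("Hi, there!", "mySecretKeyXYZ")

def Spec_running_key_decrypt (ciphertext : String) (key_text : String) (out : String) : Prop := out = running_key_decrypt_alt ciphertext key_text
instance (ciphertext : String) (key_text : String) (out : String) : Decidable (Spec_running_key_decrypt ciphertext key_text out) := by unfold Spec_running_key_decrypt; infer_instance

-- ===== CLAIM (what is proved, stated in full; the proofs are below) =====
def Claim_equal_running_key_decrypt : Prop := ∀ (ciphertext : String) (key_text : String), Dom_running_key_decrypt ciphertext key_text → Pre_running_key_decrypt ciphertext key_text → Spec_running_key_decrypt ciphertext key_text (running_key_decrypt ciphertext key_text)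

-- ===== LEMMAS AND PROOFS =====

-- A's per-character decryption value (the inline expression of rkGoA), named for the proofs
def rkDecA (ch kc : Char) : Char :=
  let base : Int := if PySem.Chars.isupper ch then 65 else 97
  let c : Int := ((PySem.Chars.upperChar ch).toNat : Int) - 65
  let k : Int := (kc.toNat : Int) - 65
  Char.ofNat (base + PySem.Int.mod (c - k) 26).toNat

-- common sequential specification both ports are reduced to
def rkSub : List Char → List Char → List Char
  | [], _ => []
  | ch :: rest, ks =>
    if PySem.Chars.isalpha ch then
      match ks with
      | k :: ks' => rkDecA ch k :: rkSub rest ks'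
      | [] => []
    else ch :: rkSub rest ks

theorem rkSub_cons_pos {ch : Char} (rest ks' : List Char) (k : Char)
    (h : PySem.Chars.isalpha ch = true) :
    rkSub (ch :: rest) (k :: ks') = rkDecA ch k :: rkSub rest ks' := by
  simp [rkSub, h]

theorem rkSub_cons_neg {ch : Char} (rest ks : List Char)
    (h : PySem.Chars.isalpha ch = false) :
    rkSub (ch :: rest) ks = ch :: rkSub rest ks := by
  cases ks <;> simp [rkSub, h]

theorem rk_isupper_iff (c : Char) : PySem.Chars.isupper c = true ↔ 65 ≤ c.toNat ∧ c.toNat ≤ 90 := by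
  show (decide ('A' ≤ c) && decide (c ≤ 'Z')) = true ↔ _
  simp only [Bool.and_eq_true, decide_eq_true_eq, Char.le_def, UInt32.le_iff_toNat_le]
  exact Iff.rfl

theorem rk_islower_iff (c : Char) : PySem.Chars.islower c = true ↔ 97 ≤ c.toNat ∧ c.toNat ≤ 122 := by
  show (decide ('a' ≤ c) && decide (c ≤ 'z')) = true ↔ _
  simp only [Bool.and_eq_true, decide_eq_true_eq, Char.le_def, UInt32.le_iff_toNat_le]
  exact Iff.rfl

theorem rk_toNat_ofNat {n : Nat} (h : n ≤ 0xd7ff) : (Char.ofNat n).toNat = n := by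
  rw [Char.toNat_ofNat, if_pos (Or.inl (by omega))]

-- an uppercased character that is alphabetic is an upper-case letter
theorem rk_isupper_upperChar {c : Char}
    (h : PySem.Chars.isalpha (PySem.Chars.upperChar c) = true) :
    PySem.Chars.isupper (PySem.Chars.upperChar c) = true := by
  by_cases hl : PySem.Chars.islower c = true
  · have hb := (rk_islower_iff c).1 hl
    have : PySem.Chars.upperChar c = Char.ofNat (c.toNat - 32) := by
      simp [PySem.Chars.upperChar, hl]
    rw [this, rk_isupper_iff, rk_toNat_ofNat (by omega)]
    omega
  · have hc : PySem.Chars.upperChar c = c := by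
      simp [PySem.Chars.upperChar, hl]
    rw [hc] at h ⊢
    have : (PySem.Chars.isupper c || PySem.Chars.islower c) = true := h
    simp [Bool.eq_false_iff.mpr hl] at this
    exact this

theorem rk_key_upper (kt : String) : ∀ k ∈ rkCleanKey kt, PySem.Chars.isupper k = true := by
  intro k hk
  rw [rkCleanKey, PySem.Chars.upper, List.mem_filter] at hk
  obtain ⟨hmem, halpha⟩ := hk
  obtain ⟨c, _, rfl⟩ := List.mem_map.1 hmem
  exact rk_isupper_upperChar halpha

-- indexing a rotated list (of length 26)
theorem rk_rot_getD (L : List Char) (r j : Nat) (d : Char) (hL : L.length = 26)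
    (hr : r ≤ 26) (hj : j < 26) :
    (L.drop r ++ L.take r).getD j d = L.getD ((r + j) % 26) d := by
  rw [List.getD_eq_getElem?_getD, List.getD_eq_getElem?_getD]
  by_cases h : j < 26 - r
  · rw [List.getElem?_append_left (by simp [hL]; omega), List.getElem?_drop,
      Nat.mod_eq_of_lt (by omega)]
  · rw [List.getElem?_append_right (by simp [hL]; omega)]
    simp only [List.length_drop, hL]
    rw [List.getElem?_take, if_pos (by omega)]
    congr 2
    omega

theorem rk_upper_getD (m : Nat) (h : m < 26) : rkUpper.getD m ' ' = Char.ofNat (65 + m) :=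
  (by decide : ∀ m : Fin 26, rkUpper.getD m.val ' ' = Char.ofNat (65 + m.val)) ⟨m, h⟩
theorem rk_lower_getD (m : Nat) (h : m < 26) : rkLower.getD m ' ' = Char.ofNat (97 + m) :=
  (by decide : ∀ m : Fin 26, rkLower.getD m.val ' ' = Char.ofNat (97 + m.val)) ⟨m, h⟩

-- the rotated-alphabet table lookup computes A's modular arithmetic
theorem rk_dec_eq {ch kc : Char} (ha : PySem.Chars.isalpha ch = true)
    (hk : PySem.Chars.isupper kc = true) : rkDecB ch kc = rkDecA ch kc := by
  have hkb := (rk_isupper_iff kc).1 hk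
  by_cases hu : PySem.Chars.isupper ch = true
  · have hcb := (rk_isupper_iff ch).1 hu
    have hnl : PySem.Chars.islower ch = false := by
      rw [Bool.eq_false_iff]; intro h; have := (rk_islower_iff ch).1 h; omega
    have huc : PySem.Chars.upperChar ch = ch := by simp [PySem.Chars.upperChar, hnl]
    rw [rkDecB, rkDecA]
    simp only [hu, if_true, huc]
    set r : Nat := (26 - (kc.toNat - 65)) % 26 with hrdef
    have hr26 : r < 26 := Nat.mod_lt _ (by norm_num)
    have hlen : rkUpper.length = 26 := by decide
    rw [rk_rot_getD rkUpper r (ch.toNat - 65) ' ' hlen (by omega) (by omega),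
      rk_upper_getD _ (Nat.mod_lt _ (by norm_num)),
      PySem.Int.mod_eq_emod_of_pos (by norm_num)]
    congr 1
    omega
  · have hl : PySem.Chars.islower ch = true := by
      have : (PySem.Chars.isupper ch || PySem.Chars.islower ch) = true := ha
      simpa [Bool.eq_false_iff.mpr, hu] using this
    have hcb := (rk_islower_iff ch).1 hl
    have huc : PySem.Chars.upperChar ch = Char.ofNat (ch.toNat - 32) := by
      simp [PySem.Chars.upperChar, hl]
    have hucn : (PySem.Chars.upperChar ch).toNat = ch.toNat - 32 := by
      rw [huc, rk_toNat_ofNat (by omega)]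
    have hu' : PySem.Chars.isupper ch = false := Bool.eq_false_iff.mpr hu
    rw [rkDecB, rkDecA]
    simp only [hu', Bool.false_eq_true, if_false, hucn]
    set r : Nat := (26 - (kc.toNat - 65)) % 26 with hrdef
    have hr26 : r < 26 := Nat.mod_lt _ (by norm_num)
    have hlen : rkLower.length = 26 := by decide
    rw [rk_rot_getD rkLower r (ch.toNat - 97) ' ' hlen (by omega) (by omega),
      rk_lower_getD _ (Nat.mod_lt _ (by norm_num)),
      PySem.Int.mod_eq_emod_of_pos (by norm_num)]
    congr 1
    omega

-- A's indexed loop equals the sequential specification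
theorem rkGoA_eq_rkSub (key : List Char) (cs : List Char) :
    ∀ (i : Nat), i + (cs.filter PySem.Chars.isalpha).length ≤ key.length →
      rkGoA key cs i = rkSub cs (key.drop i) := by
  induction cs with
  | nil => intro i _; simp [rkGoA, rkSub]
  | cons ch rest ih =>
    intro i hlen
    by_cases ha : PySem.Chars.isalpha ch
    · have hfil : (ch :: rest).filter PySem.Chars.isalpha
          = ch :: rest.filter PySem.Chars.isalpha := by simp [ha]
      rw [hfil] at hlen
      have hi : i < key.length := by simp at hlen; omega
      have hdrop : key.drop i = key[i] :: key.drop (i + 1) :=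
        List.drop_eq_getElem_cons hi
      rw [hdrop, rkSub_cons_pos rest (key.drop (i + 1)) key[i] ha]
      conv_lhs => rw [rkGoA]
      simp only [ha, if_true, dif_pos hi, List.cons.injEq]
      exact ⟨rfl, ih (i + 1) (by simp at hlen ⊢; omega)⟩
    · have ha' : PySem.Chars.isalpha ch = false := Bool.eq_false_iff.mpr ha
      have hfil : (ch :: rest).filter PySem.Chars.isalpha
          = rest.filter PySem.Chars.isalpha := by simp [ha']
      rw [hfil] at hlen
      rw [rkSub_cons_neg rest (key.drop i) ha']
      conv_lhs => rw [rkGoA]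
      simp only [ha', Bool.false_eq_true, if_false, List.cons.injEq]
      exact ⟨trivial, ih i hlen⟩

-- B's scatter-update fold equals the sequential specification
theorem rkFold_eq_rkSub (cs : List Char) :
    ∀ (ks pre : List Char),
      (∀ k ∈ ks, PySem.Chars.isupper k = true) →
      (cs.filter PySem.Chars.isalpha).length ≤ ks.length →
      ((((PySem.List.enumerate cs (pre.length : Int)).filter
          (fun p => PySem.Chars.isalpha p.2)).map (fun p => p.1)).zip ks).foldl rkStep (pre ++ cs)
        = pre ++ rkSub cs ks := by
  induction cs with
  | nil => intro ks pre _ _; simp [PySem.List.enumerate_nil, rkSub]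
  | cons ch rest ih =>
    intro ks pre hku hlen
    rw [PySem.List.enumerate_cons]
    by_cases ha : PySem.Chars.isalpha ch
    · have hfil : (ch :: rest).filter PySem.Chars.isalpha
          = ch :: rest.filter PySem.Chars.isalpha := by simp [ha]
      rw [hfil] at hlen
      obtain ⟨k0, ks', rfl⟩ : ∃ k0 ks', ks = k0 :: ks' := by
        cases ks with
        | nil => simp at hlen
        | cons a b => exact ⟨a, b, rfl⟩
      have hstep : rkStep (pre ++ ch :: rest) ((pre.length : Int), k0)
          = pre ++ rkDecA ch k0 :: rest := by
        rw [rkStep]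
        have hget : PySem.List.pyGetD (pre ++ ch :: rest) ((pre.length : Int)) ' ' = ch := by
          rw [PySem.List.pyGetD_natCast, List.getD_eq_getElem?_getD,
            List.getElem?_append_right (le_refl _)]
          simp
        rw [hget, rk_dec_eq ha (hku k0 (by simp))]
        simp  -- set at offset pre.length lands on ch
      simp only [List.filter_cons, ha, if_true, List.map_cons, List.zip_cons_cons,
        List.foldl_cons, hstep]
      have hrec := ih ks' (pre ++ [rkDecA ch k0]) (fun k hk => hku k (by simp [hk]))
        (by simp at hlen ⊢; omega)
      simp only [List.length_append, List.length_cons, List.length_nil] at hrec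
      rw [List.append_cons pre (rkDecA ch k0) rest]
      push_cast at hrec ⊢
      rw [hrec, rkSub_cons_pos rest ks' k0 ha]
      simp [List.append_assoc]
    · have ha' : PySem.Chars.isalpha ch = false := Bool.eq_false_iff.mpr ha
      have hfil : (ch :: rest).filter PySem.Chars.isalpha
          = rest.filter PySem.Chars.isalpha := by simp [ha']
      rw [hfil] at hlen
      simp only [List.filter_cons, ha', Bool.false_eq_true, if_false]
      have hrec := ih ks (pre ++ [ch]) hku hlen
      simp only [List.length_append, List.length_cons, List.length_nil] at hrec
      rw [List.append_cons pre ch rest]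
      push_cast at hrec ⊢
      rw [hrec, rkSub_cons_neg rest ks ha']
      simp [List.append_assoc]

-- ===== VERDICT (by name: the statement is the Claim_ definition above) =====
theorem running_key_decrypt_spec : Claim_equal_running_key_decrypt := by
  intro ct kt _ hpre
  unfold Spec_running_key_decrypt running_key_decrypt running_key_decrypt_alt
  have hcount : (ct.toList.filter PySem.Chars.isalpha).length ≤ (rkCleanKey kt).length := hpre.2
  have hA := rkGoA_eq_rkSub (rkCleanKey kt) ct.toList 0 (by simpa using hcount)
  have hB := rkFold_eq_rkSub ct.toList (rkCleanKey kt) [] (rk_key_upper kt) hcount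
  simp only [List.drop_zero] at hA
  simp only [List.length_nil, Nat.cast_zero, List.nil_append] at hB
  exact congrArg String.mk (hA.trans hB.symm)
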